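-- pv_equiv track=rewrite | github.com/Dgarlop/programacion2526 | Python/UD2/matrices/ejercicio12.py | genera_matriz
-- ===== SOURCE A (Python) =====
-- def genera_matriz(filas, columnas):
--     matriz = []
--
--     for i in range(filas):
--         fila = []
--         for e in range(columnas):
--             fila.append(i + e)
--         matriz.append(fila)
--     return matriz
-- ===== SOURCE B (Python) =====
-- def genera_matriz(filas, columnas):
--     if filas <= 0:
--         return []
--     fila = list(range(columnas))
--     matriz = [fila]
--     for _ in range(filas - 1):
--         fila = [x + 1 for x in fila]
--         matriz.append(fila)
--     return matriz
-- ===== Notes on version B (the rewrite author's own statement) =====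
-- stated objective: alternative
-- what changed: B builds the first row once as range(columnas) and derives each later row by adding 1 to every element of the previous row, instead of recomputing i+e for every cell with nested index loops.
import Mathlib
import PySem

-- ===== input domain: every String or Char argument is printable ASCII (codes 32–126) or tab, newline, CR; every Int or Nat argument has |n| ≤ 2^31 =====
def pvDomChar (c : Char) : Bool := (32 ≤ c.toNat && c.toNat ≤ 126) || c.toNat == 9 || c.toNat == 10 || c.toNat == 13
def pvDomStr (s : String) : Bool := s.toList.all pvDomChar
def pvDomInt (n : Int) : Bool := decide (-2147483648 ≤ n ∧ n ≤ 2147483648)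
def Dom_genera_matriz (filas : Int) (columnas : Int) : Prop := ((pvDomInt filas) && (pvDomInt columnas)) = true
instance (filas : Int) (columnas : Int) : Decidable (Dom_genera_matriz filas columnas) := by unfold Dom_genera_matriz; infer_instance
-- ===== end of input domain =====

-- B builds the first row once as range(columnas) and derives each later row by adding 1
-- to the previous row, instead of recomputing i+e per cell (objective: alternative decomposition).

-- ===== PORT A =====
def genera_matriz (filas : Int) (columnas : Int) : List (List Int) :=
  (PySem.List.pyRange 0 filas 1).foldl
    (fun matriz i =>
      matriz ++ [(PySem.List.pyRange 0 columnas 1).foldl (fun fila e => fila ++ [i + e]) []])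
    []

-- ===== PORT B =====
def genera_matriz_alt (filas : Int) (columnas : Int) : List (List Int) :=
  if filas ≤ 0 then []
  else
    let fila0 := PySem.List.pyRange 0 columnas 1
    ((PySem.List.pyRange 0 (filas - 1) 1).foldl
      (fun (st : List (List Int) × List Int) _ =>
        let fila := st.2.map (fun x => x + 1)
        (st.1 ++ [fila], fila))
      ([fila0], fila0)).1

-- ===== PRECONDITION & SPEC =====
def Spec_genera_matriz (filas : Int) (columnas : Int) (out : List (List Int)) : Prop := out = genera_matriz_alt filas columnas
instance (filas : Int) (columnas : Int) (out : List (List Int)) : Decidable (Spec_genera_matriz filas columnas out) := by unfold Spec_genera_matriz; infer_instance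

-- ===== CLAIM (what is proved, stated in full; the proofs are below) =====
def Claim_equal_genera_matriz : Prop := ∀ (filas : Int) (columnas : Int), Dom_genera_matriz filas columnas → Spec_genera_matriz filas columnas (genera_matriz filas columnas)

-- ===== LEMMAS AND PROOFS =====

-- A's output: one map per row, one map per cell.
lemma genera_matriz_char (filas columnas : Int) :
    genera_matriz filas columnas =
      (PySem.List.pyRange 0 filas 1).map
        (fun i => (PySem.List.pyRange 0 columnas 1).map (fun e => i + e)) := by
  unfold genera_matriz
  rw [PySem.List.foldl_append_singleton_eq_map]
  simp only [List.nil_append]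
  apply List.map_congr_left
  intro i _
  rw [PySem.List.foldl_append_singleton_eq_map]
  simp

-- invariant of B's loop: starting from row r, k-th appended row is r shifted by k+1
lemma alt_fold_char (l : List Int) : ∀ (acc : List (List Int)) (r : List Int),
    l.foldl
      (fun (st : List (List Int) × List Int) _ =>
        let fila := st.2.map (fun x => x + 1)
        (st.1 ++ [fila], fila))
      (acc, r)
    = (acc ++ (List.range l.length).map (fun (k : Nat) => r.map (fun x => x + ((k : Int) + 1))),
       r.map (fun x => x + (l.length : Int))) := by
  induction l with
  | nil => intro acc r; simp
  | cons a t ih =>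
    intro acc r
    simp only [List.foldl_cons]
    rw [ih (acc ++ [r.map (fun x => x + 1)]) (r.map (fun x => x + 1))]
    simp only [List.length_cons, List.range_succ_eq_map, List.map_cons, List.map_map,
      Prod.mk.injEq]
    refine ⟨?_, ?_⟩
    · rw [List.append_assoc]
      congr 1
      rw [List.singleton_append]
      congr 1
      all_goals intros
      all_goals push_cast
      all_goals try ring
      apply List.map_congr_left
      intro k _
      simp only [Function.comp_apply, Nat.succ_eq_add_one]
      apply List.map_congr_left
      intro x _
      simp only [Function.comp_apply]
      push_cast
      ring
    · simp [Function.comp, add_comm]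

theorem genera_matriz_spec_aux (filas columnas : Int) :
    genera_matriz filas columnas = genera_matriz_alt filas columnas := by
  rw [genera_matriz_char]
  unfold genera_matriz_alt
  by_cases h : filas ≤ 0
  · simp [h, PySem.List.pyRange_one_eq_nil h]
  · simp only [h, if_false]
    rw [alt_fold_char]
    simp only [PySem.List.length_pyRange_one]
    rw [PySem.List.pyRange_one (a := 0) (b := filas)]
    have hn : (filas - 0).toNat = (filas - 1 - 0).toNat + 1 := by omega
    rw [hn, List.range_succ_eq_map]
    simp only [List.map_cons, List.map_map, List.singleton_append]
    congr 1
    · simp [PySem.List.pyRange_one (a := 0) (b := columnas)]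
    · rw [PySem.List.pyRange_one (a := 0) (b := columnas)]
      simp [Function.comp, Nat.succ_eq_add_one, add_comm, add_left_comm, add_assoc]

-- ===== VERDICT (by name: the statement is the Claim_ definition above) =====
theorem genera_matriz_spec : Claim_equal_genera_matriz := by
  intro filas columnas _
  unfold Spec_genera_matriz
  exact genera_matriz_spec_aux filas columnas
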